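-- pv_equiv track=rewrite | github.com/Gaelofg/experimento | proyecto1/tkinter/tk4.py | resolucion
-- ===== SOURCE A (Python) =====
-- def resolucion(matriz):
--  numeros=[]
--  for x,fil in enumerate(matriz):
--    for y,col in enumerate(fil):
--       numeros.append(matriz[x][y])
--  if len(numeros) != len(set(numeros)):
--        return False
--  return True
-- ===== SOURCE B (Python) =====
-- def resolucion(matriz):
--     vistos = set()
--     for fil in matriz:
--         for x in fil:
--             if x in vistos:
--                 return False
--             vistos.add(x)
--     return True
-- ===== Notes on version B (the rewrite author's own statement) =====
-- stated objective: idiomatic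
-- what changed: Replaces flatten-everything-then-compare-list/set-lengths with a single-pass early-exit duplicate detector that maintains a running seen-set and returns False at the first repeated element.
import Mathlib
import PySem

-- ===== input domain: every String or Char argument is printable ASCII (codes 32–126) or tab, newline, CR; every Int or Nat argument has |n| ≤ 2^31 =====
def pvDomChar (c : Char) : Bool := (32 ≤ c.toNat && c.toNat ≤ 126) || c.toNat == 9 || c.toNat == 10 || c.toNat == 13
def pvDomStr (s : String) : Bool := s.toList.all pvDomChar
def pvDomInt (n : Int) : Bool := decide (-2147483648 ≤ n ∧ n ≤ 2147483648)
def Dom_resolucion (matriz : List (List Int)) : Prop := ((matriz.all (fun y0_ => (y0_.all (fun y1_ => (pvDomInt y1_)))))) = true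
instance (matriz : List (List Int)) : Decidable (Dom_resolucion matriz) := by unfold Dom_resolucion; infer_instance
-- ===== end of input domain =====

-- B replaces A's flatten-then-compare-set-size check by a single-pass early-exit
-- duplicate scan with a running seen-set (idiomatic; same asymptotic cost).

-- ===== PORT A =====
-- numeros = []; for x,fil in enumerate(matriz): for y,col in enumerate(fil): numeros.append(matriz[x][y])
-- if len(numeros) != len(set(numeros)): return False; return True
-- (the always-in-range indexings matriz[x][y] are ported with pyGetD, exact for in-range indices)
def resolucion (matriz : List (List Int)) : Bool :=
  let numeros : List Int :=
    (PySem.List.enumerate matriz).foldl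
      (fun acc xfil =>
        (PySem.List.enumerate xfil.2).foldl
          (fun acc2 ycol =>
            acc2 ++ [PySem.List.pyGetD (PySem.List.pyGetD matriz xfil.1 []) ycol.1 0])
          acc)
      []
  if numeros.length ≠ (PySem.Set.ofList numeros).length then false else true

-- ===== PORT B =====
-- inner loop: 'for x in fil: if x in vistos: return False; vistos.add(x)';
-- none models the early 'return False', some v the updated seen-set
def resolucionAltRow (vistos : PySem.Set Int) : List Int → Option (PySem.Set Int)
  | [] => some vistos
  | x :: xs =>
    if PySem.Set.contains vistos x then none
    else resolucionAltRow (PySem.Set.add vistos x) xs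

-- outer loop: 'for fil in matriz: …'
def resolucionAltGo (vistos : PySem.Set Int) : List (List Int) → Bool
  | [] => true
  | fil :: rest =>
    match resolucionAltRow vistos fil with
    | none => false
    | some v => resolucionAltGo v rest

def resolucion_alt (matriz : List (List Int)) : Bool :=
  resolucionAltGo PySem.Set.empty matriz

-- ===== PRECONDITION & SPEC =====
def Spec_resolucion (matriz : List (List Int)) (out : Bool) : Prop := out = resolucion_alt matriz
instance (matriz : List (List Int)) (out : Bool) : Decidable (Spec_resolucion matriz out) := by unfold Spec_resolucion; infer_instance

-- ===== CLAIM (what is proved, stated in full; the proofs are below) =====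
def Claim_equal_resolucion : Prop := ∀ (matriz : List (List Int)), Dom_resolucion matriz → Spec_resolucion matriz (resolucion matriz)

-- ===== LEMMAS AND PROOFS =====

-- 'for i,_ in enumerate(m): acc += g(full[i])' appends m.flatMap g, where full = pre ++ m
-- (serves both of A's loops: g = singleton for the inner one, g = id for the outer one)
theorem enum_getD_foldl {α β : Type} (d : α) (g : α → List β) (m : List α) :
    ∀ (pre : List α) (acc : List β),
    (PySem.List.enumerate m (pre.length : Int)).foldl
      (fun a p => a ++ g (PySem.List.pyGetD (pre ++ m) p.1 d)) acc
      = acc ++ m.flatMap g := by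
  induction m with
  | nil => intro pre acc; simp [PySem.List.enumerate]
  | cons y m ih =>
    intro pre acc
    rw [PySem.List.enumerate_cons]
    simp only [List.foldl_cons]
    have hget : PySem.List.pyGetD (pre ++ y :: m) (pre.length : Int) d = y := by
      rw [PySem.List.pyGetD_natCast]
      simp [List.getD]
    rw [hget]
    have hlen : ((pre ++ [y]).length : Int) = (pre.length : Int) + 1 := by simp
    have := ih (pre ++ [y]) (acc ++ g y)
    rw [hlen] at this
    simp only [List.append_assoc, List.singleton_append] at this
    rw [this]
    simp

-- the seen-set foldl can only grow by at most the number of fed elements …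
theorem foldl_add_len_le (l : List Int) : ∀ (s : PySem.Set Int),
    (l.foldl PySem.Set.add s).length ≤ s.length + l.length := by
  induction l with
  | nil => intro s; simp
  | cons x xs ih =>
    intro s
    simp only [List.foldl_cons]
    refine le_trans (ih _) ?_
    unfold PySem.Set.add
    split_ifs
    · simp
    · simp only [List.length_append, List.length_cons, List.length_nil]
      omega

-- … and grows by exactly that number iff everything fed was distinct and fresh
theorem foldl_add_len_iff (l : List Int) : ∀ (s : PySem.Set Int), s.Nodup →
    ((l.foldl PySem.Set.add s).length = s.length + l.length ↔ (s ++ l).Nodup) := by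
  induction l with
  | nil => intro s hs; simpa using hs
  | cons x xs ih =>
    intro s hs
    simp only [List.foldl_cons]
    by_cases hx : x ∈ s
    · have hadd : PySem.Set.add s x = s := by
        simp [PySem.Set.add, PySem.Set.contains, hx]
      rw [hadd]
      constructor
      · intro h
        have := foldl_add_len_le xs s
        simp only [List.length_cons] at h
        omega
      · intro h
        rcases List.nodup_append.mp h with ⟨-, -, hd⟩
        exact absurd (hd x hx x (List.mem_cons_self ..)) (by simp)
    · have hadd : PySem.Set.add s x = s ++ [x] := by
        simp [PySem.Set.add, PySem.Set.contains, hx]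
      have hs' : (s ++ [x]).Nodup := by
        rw [List.nodup_append]
        refine ⟨hs, List.nodup_singleton x, ?_⟩
        intro a ha b hb
        simp at hb; subst hb; intro hab; exact hx (hab ▸ ha)
      have hlen : s.length + (x :: xs).length = (s ++ [x]).length + xs.length := by
        simp only [List.length_append, List.length_cons, List.length_nil]
        omega
      rw [hadd, hlen, ih (s ++ [x]) hs']
      have hassoc : (s ++ [x]) ++ xs = s ++ x :: xs := by simp
      rw [hassoc]

theorem ofList_len_iff (l : List Int) :
    ((PySem.Set.ofList l).length = l.length ↔ l.Nodup) := by
  have := foldl_add_len_iff l [] (List.nodup_nil)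
  simpa [PySem.Set.ofList, PySem.Set.empty] using this

-- A's two nested enumerate-loops, generalized over the rows already consumed, flatten the matrix
theorem resolucion_flat (m : List (List Int)) : ∀ (pre : List (List Int)) (acc : List Int),
    (PySem.List.enumerate m (pre.length : Int)).foldl
      (fun acc xfil =>
        (PySem.List.enumerate xfil.2).foldl
          (fun a p => a ++ [PySem.List.pyGetD (PySem.List.pyGetD (pre ++ m) xfil.1 []) p.1 0]) acc)
      acc = acc ++ m.flatMap id := by
  induction m with
  | nil => intro pre acc; simp [PySem.List.enumerate]
  | cons fil m ih =>
    intro pre acc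
    rw [PySem.List.enumerate_cons]
    simp only [List.foldl_cons]
    have hrow : PySem.List.pyGetD (pre ++ fil :: m) ((pre.length : Int)) [] = fil := by
      rw [PySem.List.pyGetD_natCast]
      simp [List.getD]
    rw [hrow]
    have hin : (PySem.List.enumerate fil).foldl
        (fun a p => a ++ [PySem.List.pyGetD fil p.1 0]) acc = acc ++ fil := by
      have := enum_getD_foldl 0 (fun v => [v]) fil [] acc
      simpa [List.flatMap_singleton'] using this
    rw [hin]
    have hlen : ((pre ++ [fil]).length : Int) = (pre.length : Int) + 1 := by simp
    have := ih (pre ++ [fil]) (acc ++ fil)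
    rw [hlen] at this
    simp only [List.append_assoc, List.singleton_append] at this
    rw [this]
    simp

-- A computes: is the flattened matrix duplicate-free?
theorem resolucion_eq_nodup (matriz : List (List Int)) :
    resolucion matriz = decide ((matriz.flatMap id).Nodup) := by
  unfold resolucion
  have hflat :
      (PySem.List.enumerate matriz).foldl
        (fun acc xfil =>
          (PySem.List.enumerate xfil.2).foldl
            (fun acc2 ycol =>
              acc2 ++ [PySem.List.pyGetD (PySem.List.pyGetD matriz xfil.1 []) ycol.1 0])
            acc)
        []
      = matriz.flatMap id := by
    have := resolucion_flat matriz [] []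
    simpa using this
  rw [hflat]
  show (if (List.flatMap id matriz).length ≠ (PySem.Set.ofList (List.flatMap id matriz)).length then false else true) = decide (List.flatMap id matriz).Nodup
  split_ifs with h
  · have hn : ¬ (matriz.flatMap id).Nodup := fun hn =>
      h (((ofList_len_iff _).mpr hn).symm)
    exact (decide_eq_false hn).symm
  · have hn : (matriz.flatMap id).Nodup :=
      (ofList_len_iff _).mp (not_ne_iff.mp h).symm
    exact (decide_eq_true hn).symm

-- B's inner loop: succeed iff the row extends the seen-set without collision
theorem resolucionAltRow_spec (fil : List Int) : ∀ (s : PySem.Set Int), s.Nodup →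
    resolucionAltRow s fil = if (s ++ fil).Nodup then some (s ++ fil) else none := by
  induction fil with
  | nil => intro s hs; simp [resolucionAltRow, hs]
  | cons x xs ih =>
    intro s hs
    unfold resolucionAltRow
    by_cases hx : x ∈ s
    · have hc : PySem.Set.contains s x = true := by
        simp [PySem.Set.contains, hx]
      rw [if_pos hc, if_neg]
      intro h
      rcases List.nodup_append.mp h with ⟨-, -, hd⟩
      exact absurd (hd x hx x (List.mem_cons_self ..)) (by simp)
    · have hc : ¬ (PySem.Set.contains s x = true) := by
        simp [PySem.Set.contains, hx]
      have hadd : PySem.Set.add s x = s ++ [x] := by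
        simp [PySem.Set.add, PySem.Set.contains, hx]
      have hs' : (s ++ [x]).Nodup := by
        rw [List.nodup_append]
        refine ⟨hs, List.nodup_singleton x, ?_⟩
        intro a ha b hb
        simp at hb; subst hb; intro hab; exact hx (hab ▸ ha)
      rw [if_neg hc, hadd, ih (s ++ [x]) hs']
      have hassoc : (s ++ [x]) ++ xs = s ++ x :: xs := by simp
      rw [hassoc]

-- B computes the same predicate, relative to the current seen-set
theorem resolucionAltGo_spec (m : List (List Int)) : ∀ (s : PySem.Set Int), s.Nodup →
    resolucionAltGo s m = decide ((s ++ m.flatMap id).Nodup) := by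
  induction m with
  | nil => intro s hs; simp [resolucionAltGo, hs]
  | cons fil m ih =>
    intro s hs
    unfold resolucionAltGo
    rw [resolucionAltRow_spec fil s hs]
    by_cases hn : (s ++ fil).Nodup
    · rw [if_pos hn]
      dsimp only
      rw [ih (s ++ fil) hn]
      congr 1
      simp [List.append_assoc]
    · rw [if_neg hn]
      have hno : ¬ (s ++ (fil :: m).flatMap id).Nodup := by
        intro h
        apply hn
        refine h.sublist ?_
        simp only [List.flatMap_cons, id]
        rw [← List.append_assoc]
        exact List.sublist_append_left _ _
      dsimp only
      exact (decide_eq_false hno).symm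

theorem resolucion_alt_eq_nodup (matriz : List (List Int)) :
    resolucion_alt matriz = decide ((matriz.flatMap id).Nodup) := by
  unfold resolucion_alt
  have := resolucionAltGo_spec matriz PySem.Set.empty (by simp [PySem.Set.empty])
  simpa [PySem.Set.empty] using this

-- ===== VERDICT (by name: the statement is the Claim_ definition above) =====
theorem resolucion_spec : Claim_equal_resolucion := by
  intro matriz _
  unfold Spec_resolucion
  rw [resolucion_eq_nodup, resolucion_alt_eq_nodup]
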